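-- pv_equiv track=rewrite | github.com/xingyizhou/UniDet | tools/convert_datasets/convert_mappilary.py | _cat_id_maps
-- ===== SOURCE A (Python) =====
-- def _cat_id_maps(categories):
--     cat_id_mvd_to_iss = dict()
--     cat_id_iss_to_mvd = dict()
--
--     num_thing, num_stuff = 0, 0
--     # Find stuff
--     for cat_id, cat_meta in enumerate(categories):
--         if not cat_meta["evaluate"]:
--             continue
--
--         if not cat_meta["instances"]:
--             cat_id_mvd_to_iss[cat_id] = num_stuff
--             cat_id_iss_to_mvd[num_stuff] = cat_id
--             num_stuff += 1
--
--     for cat_id, cat_meta in enumerate(categories):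
--         if not cat_meta["evaluate"]:
--             continue
--
--         if cat_meta["instances"]:
--             cat_id_mvd_to_iss[cat_id] = num_thing + num_stuff
--             cat_id_iss_to_mvd[num_thing + num_stuff] = cat_id
--             num_thing += 1
--
--     return cat_id_mvd_to_iss, cat_id_iss_to_mvd, num_stuff, num_thing
-- ===== SOURCE B (Python) =====
-- def _cat_id_maps(categories):
--     # One pass partitions the evaluated category ids into stuff/things,
--     # then a single indexing pass over the concatenation builds both maps.
--     stuff_ids, thing_ids = [], []
--     for cat_id, cat_meta in enumerate(categories):
--         if not cat_meta["evaluate"]: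
--             continue
--         (thing_ids if cat_meta["instances"] else stuff_ids).append(cat_id)
--
--     cat_id_mvd_to_iss = {}
--     cat_id_iss_to_mvd = {}
--     for i, cat_id in enumerate(stuff_ids + thing_ids):
--         cat_id_mvd_to_iss[cat_id] = i
--         cat_id_iss_to_mvd[i] = cat_id
--
--     return cat_id_mvd_to_iss, cat_id_iss_to_mvd, len(stuff_ids), len(thing_ids)
-- ===== Notes on version B (the rewrite author's own statement) =====
-- stated objective: simpler
-- what changed: Instead of two full scans that interleave counting with dict insertion, B partitions the evaluated category ids into stuff/thing lists in one pass and then builds both dicts by enumerating the concatenated id list.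
import Mathlib
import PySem

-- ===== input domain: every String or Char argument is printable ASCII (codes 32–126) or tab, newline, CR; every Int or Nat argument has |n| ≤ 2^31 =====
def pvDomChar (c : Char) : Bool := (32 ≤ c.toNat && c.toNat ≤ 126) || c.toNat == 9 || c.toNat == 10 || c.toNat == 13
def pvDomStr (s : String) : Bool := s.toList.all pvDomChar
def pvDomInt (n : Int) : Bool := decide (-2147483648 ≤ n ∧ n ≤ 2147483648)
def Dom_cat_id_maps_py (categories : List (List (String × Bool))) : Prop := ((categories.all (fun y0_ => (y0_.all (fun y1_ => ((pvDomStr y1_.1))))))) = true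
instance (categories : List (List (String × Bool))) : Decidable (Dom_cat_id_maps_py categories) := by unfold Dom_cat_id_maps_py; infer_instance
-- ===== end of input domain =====

-- B replaces A's two counting-while-inserting scans by a partition pass followed by a
-- single indexing pass over the concatenated id list (objective: simpler decomposition).

-- shared primitive: cat_meta[k] for the dict-as-association-list (first match);
-- Pre_ guarantees the key is present wherever Python reads it (else Python raises KeyError)
def pvMetaGet (m : List (String × Bool)) (k : String) : Option Bool :=
  (m.find? (fun p => p.1 == k)).map (·.2)

def pvMetaGetD (m : List (String × Bool)) (k : String) : Bool :=
  (pvMetaGet m k).getD false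

-- ===== PORT A =====
-- first loop body: stuff (evaluate and not instances); state (mvd_to_iss, iss_to_mvd, num_stuff)
def pvStep1 (st : PySem.Dict Int Int × PySem.Dict Int Int × Int)
    (p : Int × List (String × Bool)) : PySem.Dict Int Int × PySem.Dict Int Int × Int :=
  if pvMetaGetD p.2 "evaluate" = false then st
  else if pvMetaGetD p.2 "instances" = false then
    (st.1.insert p.1 st.2.2, st.2.1.insert st.2.2 p.1, st.2.2 + 1)
  else st

-- second loop body: things; ns = final num_stuff, state carries num_thing
def pvStep2 (ns : Int) (st : PySem.Dict Int Int × PySem.Dict Int Int × Int)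
    (p : Int × List (String × Bool)) : PySem.Dict Int Int × PySem.Dict Int Int × Int :=
  if pvMetaGetD p.2 "evaluate" = false then st
  else if pvMetaGetD p.2 "instances" = false then st
  else (st.1.insert p.1 (st.2.2 + ns), st.2.1.insert (st.2.2 + ns) p.1, st.2.2 + 1)

def cat_id_maps_py (categories : List (List (String × Bool))) :
    (List (Int × Int)) × (List (Int × Int)) × Int × Int :=
  let st1 := (PySem.List.enumerate categories).foldl pvStep1 (PySem.Dict.empty, PySem.Dict.empty, 0)
  let st2 := (PySem.List.enumerate categories).foldl (pvStep2 st1.2.2) (st1.1, st1.2.1, 0)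
  (st2.1.items, st2.2.1.items, st1.2.2, st2.2.2)

-- ===== PORT B =====
-- partition pass: collect stuff ids and thing ids
def pvPartStep (st : List Int × List Int) (p : Int × List (String × Bool)) : List Int × List Int :=
  if pvMetaGetD p.2 "evaluate" = false then st
  else if pvMetaGetD p.2 "instances" then (st.1, st.2 ++ [p.1]) else (st.1 ++ [p.1], st.2)

-- indexing pass: for (i, cat_id) in enumerate(ids): d1[cat_id] = i; d2[i] = cat_id
def pvIndexStep (st : PySem.Dict Int Int × PySem.Dict Int Int) (p : Int × Int) :
    PySem.Dict Int Int × PySem.Dict Int Int :=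
  (st.1.insert p.2 p.1, st.2.insert p.1 p.2)

def cat_id_maps_py_alt (categories : List (List (String × Bool))) :
    (List (Int × Int)) × (List (Int × Int)) × Int × Int :=
  let pt := (PySem.List.enumerate categories).foldl pvPartStep ([], [])
  let d := (PySem.List.enumerate (pt.1 ++ pt.2)).foldl pvIndexStep (PySem.Dict.empty, PySem.Dict.empty)
  (d.1.items, d.2.items, PySem.List.len pt.1, PySem.List.len pt.2)

-- ===== PRECONDITION & SPEC =====
-- Pre_ excludes exactly the inputs where the Python A raises KeyError: some cat_meta has
-- no "evaluate" key, or it evaluates truthy and the "instances" key is missing.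
def Pre_cat_id_maps_py (categories : List (List (String × Bool))) : Prop :=
  ∀ m ∈ categories,
    ((m.find? (fun p => p.1 == "evaluate")).map (·.2)).isSome ∧
    ((m.find? (fun p => p.1 == "evaluate")).map (·.2) = some true →
      ((m.find? (fun p => p.1 == "instances")).map (·.2)).isSome)

instance (categories : List (List (String × Bool))) : Decidable (Pre_cat_id_maps_py categories) := by
  unfold Pre_cat_id_maps_py; infer_instance

def pvWitness_cat_id_maps_py : (List (List (String × Bool))) :=
  [[("evaluate", true), ("instances", false)],
   [("evaluate", false)],
   [("evaluate", true), ("instances", true)]]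

def Spec_cat_id_maps_py (categories : List (List (String × Bool))) (out : (List (Int × Int)) × (List (Int × Int)) × Int × Int) : Prop := out = cat_id_maps_py_alt categories
instance (categories : List (List (String × Bool))) (out : (List (Int × Int)) × (List (Int × Int)) × Int × Int) : Decidable (Spec_cat_id_maps_py categories out) := by unfold Spec_cat_id_maps_py; infer_instance

-- ===== CLAIM (what is proved, stated in full; the proofs are below) =====
def Claim_equal_cat_id_maps_py : Prop := ∀ (categories : List (List (String × Bool))), Dom_cat_id_maps_py categories → Pre_cat_id_maps_py categories → Spec_cat_id_maps_py categories (cat_id_maps_py categories)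

-- ===== LEMMAS AND PROOFS =====

-- the evaluated stuff/thing ids of an enumerated prefix
def pvStuffIds (l : List (Int × List (String × Bool))) : List Int :=
  (l.filter (fun p => pvMetaGetD p.2 "evaluate" && !pvMetaGetD p.2 "instances")).map (·.1)

def pvThingIds (l : List (Int × List (String × Bool))) : List Int :=
  (l.filter (fun p => pvMetaGetD p.2 "evaluate" && pvMetaGetD p.2 "instances")).map (·.1)

-- common insert step: q = (cat_id, index)
def pvGenStep (st : PySem.Dict Int Int × PySem.Dict Int Int) (q : Int × Int) :
    PySem.Dict Int Int × PySem.Dict Int Int :=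
  (st.1.insert q.1 q.2, st.2.insert q.2 q.1)

-- (cat_id, index) pairs for ids starting at index s
def pvPairs (ids : List Int) (s : Int) : List (Int × Int) :=
  (PySem.List.enumerate ids s).map (fun q => (q.2, q.1))

theorem pvPart_spec (l : List (Int × List (String × Bool))) (s0 t0 : List Int) :
    l.foldl pvPartStep (s0, t0) = (s0 ++ pvStuffIds l, t0 ++ pvThingIds l) := by
  induction l generalizing s0 t0 with
  | nil => simp [pvStuffIds, pvThingIds]
  | cons p l ih =>
    by_cases he : pvMetaGetD p.2 "evaluate" = false <;>
      by_cases hi : pvMetaGetD p.2 "instances" = false <;>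
        simp [pvPartStep, pvStuffIds, pvThingIds, he, hi, ih]

theorem pvLoop1_spec (l : List (Int × List (String × Bool)))
    (m1 m2 : PySem.Dict Int Int) (ns : Int) :
    l.foldl pvStep1 (m1, m2, ns) =
      (((pvPairs (pvStuffIds l) ns).foldl pvGenStep (m1, m2)).1,
       ((pvPairs (pvStuffIds l) ns).foldl pvGenStep (m1, m2)).2,
       ns + ((pvStuffIds l).length : Int)) := by
  induction l generalizing m1 m2 ns with
  | nil => simp [pvStuffIds, pvPairs]
  | cons p l ih =>
    by_cases he : pvMetaGetD p.2 "evaluate" = false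
    · have hs : pvStuffIds (p :: l) = pvStuffIds l := by
        simp [pvStuffIds, he]
      simp only [List.foldl_cons, pvStep1, he, if_true, hs]
      exact ih m1 m2 ns
    · by_cases hi : pvMetaGetD p.2 "instances" = false
      · have hs : pvStuffIds (p :: l) = p.1 :: pvStuffIds l := by
          simp [pvStuffIds, he, hi]
        simp only [List.foldl_cons, pvStep1, he, hi, if_true, hs,
          pvPairs, PySem.List.enumerate_cons, List.map_cons, pvGenStep]
        rw [ih]
        simp only [pvPairs, List.length_cons, Prod.mk.injEq]
        refine ⟨rfl, rfl, by push_cast; omega⟩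
      · have hs : pvStuffIds (p :: l) = pvStuffIds l := by
          simp [pvStuffIds, he, hi]
        simp only [List.foldl_cons, pvStep1, he, hi, hs]
        exact ih m1 m2 ns

theorem pvLoop2_spec (l : List (Int × List (String × Bool)))
    (ns : Int) (m1 m2 : PySem.Dict Int Int) (nt : Int) :
    l.foldl (pvStep2 ns) (m1, m2, nt) =
      (((pvPairs (pvThingIds l) (ns + nt)).foldl pvGenStep (m1, m2)).1,
       ((pvPairs (pvThingIds l) (ns + nt)).foldl pvGenStep (m1, m2)).2,
       nt + ((pvThingIds l).length : Int)) := by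
  induction l generalizing m1 m2 nt with
  | nil => simp [pvThingIds, pvPairs]
  | cons p l ih =>
    by_cases he : pvMetaGetD p.2 "evaluate" = false
    · have ht : pvThingIds (p :: l) = pvThingIds l := by
        simp [pvThingIds, he]
      simp only [List.foldl_cons, pvStep2, he, if_true, ht]
      exact ih m1 m2 nt
    · by_cases hi : pvMetaGetD p.2 "instances" = false
      · have ht : pvThingIds (p :: l) = pvThingIds l := by
          simp [pvThingIds, he, hi]
        simp only [List.foldl_cons, pvStep2, he, hi, if_true, ht]
        exact ih m1 m2 nt
      · have ht : pvThingIds (p :: l) = p.1 :: pvThingIds l := by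
          simp [pvThingIds, he, hi]
        simp only [List.foldl_cons]
        rw [show pvStep2 ns (m1, m2, nt) p
            = (m1.insert p.1 (nt + ns), m2.insert (nt + ns) p.1, nt + 1) from by
          simp [pvStep2, he, hi]]
        have hc : nt + ns = ns + nt := by omega
        rw [hc, ih]
        have ha : ns + (nt + 1) = ns + nt + 1 := by omega
        rw [ht, ha]
        simp only [pvPairs, PySem.List.enumerate_cons, List.map_cons, List.foldl_cons,
          pvGenStep, List.length_cons, Prod.mk.injEq]
        refine ⟨trivial, trivial, by push_cast; omega⟩

theorem pvIndex_eq_gen (l : List (Int × Int)) (d : PySem.Dict Int Int × PySem.Dict Int Int) :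
    l.foldl pvIndexStep d = (l.map (fun q => (q.2, q.1))).foldl pvGenStep d := by
  rw [List.foldl_map]; rfl

theorem pvMapSwap_eq_pairs (ids : List Int) (s : Int) :
    (PySem.List.enumerate ids s).map (fun q => (q.2, q.1)) = pvPairs ids s := rfl

theorem pvPairs_append (xs ys : List Int) (s : Int) :
    pvPairs (xs ++ ys) s = pvPairs xs s ++ pvPairs ys (s + (xs.length : Int)) := by
  simp [pvPairs, PySem.List.enumerate_append]

-- ===== VERDICT (by name: the statement is the Claim_ definition above) =====
theorem cat_id_maps_py_spec : Claim_equal_cat_id_maps_py := by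
  intro categories _ _
  show cat_id_maps_py categories = cat_id_maps_py_alt categories
  simp only [cat_id_maps_py, cat_id_maps_py_alt, pvPart_spec, pvLoop1_spec, pvLoop2_spec,
    pvIndex_eq_gen, pvMapSwap_eq_pairs, List.nil_append, pvPairs_append, List.foldl_append,
    zero_add, add_zero]
  simp only [PySem.List.len_eq]
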